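-- pv_equiv track=rewrite | github.com/Felgolm/homework | lvl_2/task_2.2.py | quarter_of
-- ===== SOURCE A (Python) =====
-- def quarter_of(month: int) -> str:
--     quarter_dict = {
--         "Первый квартал": (1, 2, 3),
--         "Второй квартал": (4, 5, 6),
--         "Третий квартал": (7, 8, 9),
--         "Четвертый квартал": (10, 11, 12)
--     }
--
--     months = {
--         1: 'январь', 2: "февраль", 3: "март",
--         4: "апрель", 5: "май", 6: "июнь",
--         7: "июль", 8: "август", 9: "сентябрь",
--         10: "октябрь", 11: "ноябрь", 12: "декабрь"}
--
--     for quarter in quarter_dict.keys():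
--         if month in quarter_dict[quarter]:
--             return f'{months[month].title()} - {quarter}'
--
--     return "Введены некорректные данные"
-- ===== SOURCE B (Python) =====
-- MONTH_NAMES = ['Январь', 'Февраль', 'Март', 'Апрель', 'Май', 'Июнь',
--                'Июль', 'Август', 'Сентябрь', 'Октябрь', 'Ноябрь', 'Декабрь']
-- QUARTER_NAMES = ['Первый квартал', 'Второй квартал',
--                  'Третий квартал', 'Четвертый квартал']
--
--
-- def quarter_of(month: int) -> str:
--     if 1 <= month <= 12:
--         return f'{MONTH_NAMES[month - 1]} - {QUARTER_NAMES[(month - 1) // 3]}'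
--     return "Введены некорректные данные"
-- ===== Notes on version B (the rewrite author's own statement) =====
-- stated objective: simpler
-- what changed: Replaces the scan over the quarter dict (membership test in each tuple) and the title()-ed month dict lookup by a range guard plus direct arithmetic indexing into two precomputed lists (month-1 and (month-1)//3).
import Mathlib
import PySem

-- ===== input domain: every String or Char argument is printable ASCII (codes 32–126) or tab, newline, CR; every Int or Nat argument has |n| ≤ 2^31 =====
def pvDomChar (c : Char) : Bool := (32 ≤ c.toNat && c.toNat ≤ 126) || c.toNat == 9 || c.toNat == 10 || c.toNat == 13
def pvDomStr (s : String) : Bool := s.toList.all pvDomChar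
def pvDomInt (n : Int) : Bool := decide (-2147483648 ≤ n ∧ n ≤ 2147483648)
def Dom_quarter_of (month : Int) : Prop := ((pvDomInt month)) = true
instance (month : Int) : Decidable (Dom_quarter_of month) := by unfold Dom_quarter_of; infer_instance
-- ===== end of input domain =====

-- B replaces A's scan over the quarter dict and title()-ed month lookup by a range
-- guard and direct arithmetic indexing into two precomputed name lists (simpler).


-- ===== PORT A =====
-- hand port of str.title(): uppercases the first character of the (single
-- lowercase Cyrillic) word; exact for the values of A's `months` dict, which
-- are single words of lowercase Cyrillic letters а–я.
def pyTitleCyr (s : String) : String :=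
  match s.toList with
  | [] => ""
  | c :: cs =>
    String.ofList ((if 0x430 ≤ c.toNat ∧ c.toNat ≤ 0x44F then Char.ofNat (c.toNat - 0x20) else c) :: cs)

def quarterDictA : List (String × List Int) :=
  [("Первый квартал", [1, 2, 3]), ("Второй квартал", [4, 5, 6]),
   ("Третий квартал", [7, 8, 9]), ("Четвертый квартал", [10, 11, 12])]

def monthsA : PySem.Dict Int String :=
  PySem.Dict.ofList
  [(1, "январь"), (2, "февраль"), (3, "март"), (4, "апрель"), (5, "май"), (6, "июнь"),
   (7, "июль"), (8, "август"), (9, "сентябрь"), (10, "октябрь"), (11, "ноябрь"), (12, "декабрь")]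

-- the `for quarter in quarter_dict.keys()` loop, as structural recursion
def quarterLoopA (month : Int) : List (String × List Int) → String
  | [] => "Введены некорректные данные"
  | (q, ms) :: rest =>
    if month ∈ ms then
      -- f'{months[month].title()} - {quarter}', built on the List Char side (String ++ is kernel-opaque)
      String.ofList ((pyTitleCyr (PySem.Dict.getD monthsA month "")).toList ++ " - ".toList ++ q.toList)
    else quarterLoopA month rest

def quarter_of (month : Int) : String := quarterLoopA month quarterDictA

-- ===== PORT B =====
def monthNamesB : List String :=
  ["Январь", "Февраль", "Март", "Апрель", "Май", "Июнь",
   "Июль", "Август", "Сентябрь", "Октябрь", "Ноябрь", "Декабрь"]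

def quarterNamesB : List String :=
  ["Первый квартал", "Второй квартал", "Третий квартал", "Четвертый квартал"]

def quarter_of_alt (month : Int) : String :=
  if 1 ≤ month ∧ month ≤ 12 then
    String.ofList (((PySem.List.pyGet? monthNamesB (month - 1)).getD "").toList ++ " - ".toList ++
      ((PySem.List.pyGet? quarterNamesB (PySem.Int.floordiv (month - 1) 3)).getD "").toList)
  else "Введены некорректные данные"

-- ===== PRECONDITION & SPEC =====
def Spec_quarter_of (month : Int) (out : String) : Prop := out = quarter_of_alt month
instance (month : Int) (out : String) : Decidable (Spec_quarter_of month out) := by unfold Spec_quarter_of; infer_instance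

-- ===== CLAIM (what is proved, stated in full; the proofs are below) =====
def Claim_equal_quarter_of : Prop := ∀ (month : Int), Dom_quarter_of month → Spec_quarter_of month (quarter_of month)

-- ===== LEMMAS AND PROOFS =====

-- ===== VERDICT (by name: the statement is the Claim_ definition above) =====
theorem quarter_of_spec : Claim_equal_quarter_of := by
  intro month _
  show quarter_of month = quarter_of_alt month
  by_cases h : 1 ≤ month ∧ month ≤ 12
  · obtain ⟨h1, h2⟩ := h
    interval_cases month <;> decide
  · have e : quarter_of_alt month = "Введены некорректные данные" := by
      simp [quarter_of_alt, h]
    rw [e]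
    have n1 : month ∉ ([1, 2, 3] : List Int) := by simp; omega
    have n2 : month ∉ ([4, 5, 6] : List Int) := by simp; omega
    have n3 : month ∉ ([7, 8, 9] : List Int) := by simp; omega
    have n4 : month ∉ ([10, 11, 12] : List Int) := by simp; omega
    simp [quarter_of, quarterDictA, quarterLoopA, n1, n2, n3, n4]
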